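-- pv_equiv track=rewrite | github.com/CTXY/table_retrieval | question_generator/generator.py | group_cells_by_row
-- ===== SOURCE A (Python) =====
-- def group_cells_by_row(cells):
--     rows = {}
--     for cell in cells:
--         row_idx = cell['row_idx']
--         if row_idx not in rows:
--             rows[row_idx] = []
--         rows[row_idx].append(cell['text'])
--     return list(rows.values())
-- ===== SOURCE B (Python) =====
-- def group_cells_by_row(cells):
--     order = []
--     for cell in cells:
--         k = cell['row_idx']
--         if k not in order:
--             order.append(k)
--     return [[c['text'] for c in cells if c['row_idx'] == k] for k in order]
-- ===== Notes on version B (the rewrite author's own statement) =====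
-- stated objective: simpler
-- what changed: Replaces single-pass dict accumulation with a two-pass decomposition: first collect the distinct row indices in order of first appearance, then build each group by filtering the cells for that index.
import Mathlib
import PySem

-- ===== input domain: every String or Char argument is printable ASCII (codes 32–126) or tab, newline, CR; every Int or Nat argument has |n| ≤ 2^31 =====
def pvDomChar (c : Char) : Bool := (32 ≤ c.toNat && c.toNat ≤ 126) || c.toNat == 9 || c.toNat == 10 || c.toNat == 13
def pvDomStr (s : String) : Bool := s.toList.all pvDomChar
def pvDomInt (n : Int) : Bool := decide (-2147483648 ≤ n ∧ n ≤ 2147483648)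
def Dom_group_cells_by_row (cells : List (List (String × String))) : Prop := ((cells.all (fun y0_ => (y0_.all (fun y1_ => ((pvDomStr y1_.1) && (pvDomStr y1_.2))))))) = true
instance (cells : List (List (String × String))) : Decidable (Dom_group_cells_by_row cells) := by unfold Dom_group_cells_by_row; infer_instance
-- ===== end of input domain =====

-- B groups cell texts by first collecting the distinct row indices in first-appearance
-- order and then filtering the cells once per index (objective: simpler decomposition).

-- ===== PORT A =====
-- cell['row_idx'] / cell['text'] on the association-list dict (none = KeyError, excluded by Pre_)
def pvRowOf (cell : List (String × String)) : Option String :=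
  (PySem.Dict.mk cell).get? "row_idx"

def pvTextOf (cell : List (String × String)) : Option String :=
  (PySem.Dict.mk cell).get? "text"

-- loop body of A: if row_idx not in rows: rows[row_idx] = []; rows[row_idx].append(text)
def pvStepA (d : PySem.Dict String (List String)) (cell : List (String × String)) :
    PySem.Dict String (List String) :=
  match pvRowOf cell with
  | none => d          -- Python raises KeyError here; such inputs are outside Pre_
  | some k =>
    let d1 := if d.contains k then d else d.insert k []
    match pvTextOf cell with
    | none => d1       -- Python raises KeyError here; outside Pre_
    | some t => d1.modify k [] (· ++ [t])

def group_cells_by_row (cells : List (List (String × String))) : List (List String) :=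
  (cells.foldl pvStepA PySem.Dict.empty).values

-- ===== PORT B =====
-- first pass of B: distinct row indices in order of first appearance
def pvStepO (ord : List String) (cell : List (String × String)) : List String :=
  match pvRowOf cell with
  | none => ord        -- Python raises KeyError here; outside Pre_
  | some k => if k ∈ ord then ord else ord ++ [k]

-- [c['text'] for c in cells if c['row_idx'] == k]
def pvGrp (cells : List (List (String × String))) (k : String) : List String :=
  (cells.filter (fun c => pvRowOf c == some k)).map (fun c => (pvTextOf c).getD "")

def group_cells_by_row_alt (cells : List (List (String × String))) : List (List String) :=
  (cells.foldl pvStepO []).map (fun k => pvGrp cells k)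

-- ===== PRECONDITION & SPEC =====
-- Pre_ excludes exactly the cells missing the key 'row_idx' or 'text', on which A raises KeyError.
def Pre_group_cells_by_row (cells : List (List (String × String))) : Prop :=
  (cells.all (fun c => (PySem.Dict.mk c).contains "row_idx" && (PySem.Dict.mk c).contains "text")) = true
instance (cells : List (List (String × String))) : Decidable (Pre_group_cells_by_row cells) := by
  unfold Pre_group_cells_by_row; infer_instance

def pvWitness_group_cells_by_row : (List (List (String × String))) :=
  [[("row_idx", "0"), ("text", "a")], [("row_idx", "1"), ("text", "b")], [("row_idx", "0"), ("text", "c")]]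

def Spec_group_cells_by_row (cells : List (List (String × String))) (out : List (List String)) : Prop := out = group_cells_by_row_alt cells
instance (cells : List (List (String × String))) (out : List (List String)) : Decidable (Spec_group_cells_by_row cells out) := by unfold Spec_group_cells_by_row; infer_instance

-- ===== CLAIM (what is proved, stated in full; the proofs are below) =====
def Claim_equal_group_cells_by_row : Prop := ∀ (cells : List (List (String × String))), Dom_group_cells_by_row cells → Pre_group_cells_by_row cells → Spec_group_cells_by_row cells (group_cells_by_row cells)

-- ===== LEMMAS AND PROOFS =====

-- membership in the order accumulator is monotone along the fold
lemma mem_foldl_stepO (l : List (List (String × String))) (acc : List String) (x : String)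
    (hx : x ∈ acc) : x ∈ l.foldl pvStepO acc := by
  induction l generalizing acc with
  | nil => exact hx
  | cons c l ih =>
    simp only [List.foldl_cons]
    apply ih
    unfold pvStepO
    cases pvRowOf c with
    | none => exact hx
    | some k =>
      simp only
      split
      · exact hx
      · exact List.mem_append_left _ hx

-- every row index occurring in l ends up in the order list
lemma row_mem_foldl_stepO (l : List (List (String × String))) (acc : List String)
    (c : List (String × String)) (hc : c ∈ l) (k : String) (hk : pvRowOf c = some k) :
    k ∈ l.foldl pvStepO acc := by
  induction l generalizing acc with
  | nil => cases hc
  | cons c' l ih =>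
    simp only [List.foldl_cons]
    rcases List.mem_cons.mp hc with h | h
    · subst h
      apply mem_foldl_stepO
      unfold pvStepO
      rw [hk]
      simp only
      split
      · assumption
      · exact List.mem_append_right _ (List.mem_singleton.mpr rfl)
    · exact ih _ h

-- the order accumulator stays duplicate-free
lemma nodup_foldl_stepO (l : List (List (String × String))) (acc : List String)
    (h : acc.Nodup) : (l.foldl pvStepO acc).Nodup := by
  induction l generalizing acc with
  | nil => exact h
  | cons c l ih =>
    simp only [List.foldl_cons]
    apply ih
    unfold pvStepO
    cases pvRowOf c with
    | none => exact h
    | some k =>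
      simp only
      split
      · exact h
      · rename_i hnm
        simp [List.nodup_append, h]
        intro a ha hak
        exact hnm (hak ▸ ha)

-- if k was never seen, no cell of l carries it, so the filtered group is empty
lemma grp_nil_of_not_mem (l : List (List (String × String))) (k : String)
    (hk : k ∉ l.foldl pvStepO []) : pvGrp l k = [] := by
  unfold pvGrp
  rw [List.filter_eq_nil_iff.mpr, List.map_nil]
  intro c hc hbeq
  exact hk (row_mem_foldl_stepO l [] c hc k (by simpa using hbeq))

-- appending one cell extends exactly its own group by its text
lemma grp_append (l : List (List (String × String))) (c : List (String × String))
    (k t : String) (hk : pvRowOf c = some k) (ht : pvTextOf c = some t) (k' : String) :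
    pvGrp (l ++ [c]) k' = pvGrp l k' ++ (if k = k' then [t] else []) := by
  unfold pvGrp
  rw [List.filter_append, List.map_append]
  congr 1
  simp only [List.filter_cons, List.filter_nil, hk, beq_iff_eq, Option.some.injEq]
  split_ifs with h
  · simp [ht]
  · simp

-- main invariant: the dict's items list is the order list paired with the filtered groups
lemma items_foldl_stepA (cells : List (List (String × String)))
    (hp : ∀ c ∈ cells, (pvRowOf c).isSome ∧ (pvTextOf c).isSome) :
    (cells.foldl pvStepA PySem.Dict.empty).items
      = (cells.foldl pvStepO []).map (fun k => (k, pvGrp cells k)) := by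
  induction cells using List.reverseRecOn with
  | nil => rfl
  | append_singleton l c ih =>
    have hl : ∀ c' ∈ l, (pvRowOf c').isSome ∧ (pvTextOf c').isSome := by
      intro c' hc'; exact hp c' (List.mem_append_left _ hc')
    obtain ⟨hks, hts⟩ := hp c (List.mem_append_right _ (List.mem_singleton.mpr rfl))
    obtain ⟨k, hk⟩ := Option.isSome_iff_exists.mp hks
    obtain ⟨t, ht⟩ := Option.isSome_iff_exists.mp hts
    have ihl := ih hl
    set D := l.foldl pvStepA PySem.Dict.empty with hD
    set O := l.foldl pvStepO [] with hO
    have hkeys : D.keys = O := by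
      simp only [PySem.Dict.keys, ihl, List.map_map]
      simp [Function.comp_def]
    have hnd : D.keys.Nodup := by rw [hkeys]; exact nodup_foldl_stepO l [] List.nodup_nil
    have hcont : D.contains k = decide (k ∈ O) := by
      rw [PySem.Dict.contains_eq_decide_mem_keys, hkeys]
    rw [List.foldl_append, List.foldl_append]
    simp only [List.foldl_cons, List.foldl_nil, ← hD, ← hO]
    unfold pvStepA pvStepO
    rw [hk, ht]
    simp only [hcont]
    by_cases hmem : k ∈ O
    · -- existing row index: modify appends t to its group; the order list is unchanged
      simp only [hmem, decide_true, if_pos]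
      have hmemItems : (k, pvGrp l k) ∈ D.items := by
        rw [ihl]; exact List.mem_map.mpr ⟨k, hmem, rfl⟩
      have hgetD : D.getD k [] = pvGrp l k :=
        PySem.Dict.getD_of_mem_items D hmemItems hnd []
      have hcontT : D.contains k = true := by rw [hcont]; simpa using hmem
      rw [PySem.Dict.modify, hgetD, PySem.Dict.items_insert_of_contains D _ hcontT, ihl,
        List.map_map]
      apply List.map_congr_left
      intro k' hk'
      rw [grp_append l c k t hk ht k']
      by_cases h : k' = k
      · subst h; simp
      · have h2 : ¬k = k' := fun h' => h h'.symm
        simp [h, h2]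
    · -- new row index: setdefault-then-append appends (k, [t]) at the end
      simp only [hmem, decide_false, if_neg, Bool.false_eq_true, not_false_eq_true]
      have hcontF : D.contains k = false := by rw [hcont]; simpa using hmem
      rw [PySem.Dict.modify, PySem.Dict.getD_insert_self, PySem.Dict.insert_insert_self,
        PySem.Dict.items_insert_of_not_contains D _ hcontF, ihl, List.map_append]
      congr 1
      · apply List.map_congr_left
        intro k' hk'
        have hne : k ≠ k' := fun h => hmem (h ▸ hk')
        rw [grp_append l c k t hk ht k', if_neg hne, List.append_nil]
      · rw [List.map_singleton, grp_append l c k t hk ht k, if_pos rfl,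
          grp_nil_of_not_mem l k hmem]

-- ===== VERDICT (by name: the statement is the Claim_ definition above) =====
theorem group_cells_by_row_spec : Claim_equal_group_cells_by_row := by
  intro cells _ hpre
  have hp : ∀ c ∈ cells, (pvRowOf c).isSome ∧ (pvTextOf c).isSome := by
    intro c hc
    have := List.all_eq_true.mp hpre c hc
    simp only [Bool.and_eq_true] at this
    constructor
    · rw [pvRowOf, ← PySem.Dict.contains_eq_isSome_get?]; exact this.1
    · rw [pvTextOf, ← PySem.Dict.contains_eq_isSome_get?]; exact this.2
  show _ = _
  unfold group_cells_by_row group_cells_by_row_alt PySem.Dict.values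
  rw [items_foldl_stepA cells hp, List.map_map]
  simp [Function.comp_def]
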